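-- pv_equiv track=rewrite | github.com/usc-sail/mica-character-attribution | 50-modeling/context-and-classify/71-prepare-inputs.py | concatenate_adjoining_texts
-- ===== SOURCE A (Python) =====
-- def concatenate_adjoining_texts(texts, ix):
--     adjoined_texts = []
--     i = 0
--     while i < len(ix):
--         j = i + 1
--         while j < len(ix) and ix[j] == ix[j - 1] + 1:
--             j += 1
--         adjoined_texts.append(" ".join(texts[i: j]))
--         i = j
--     return adjoined_texts
-- ===== SOURCE B (Python) =====
-- def concatenate_adjoining_texts(texts, ix):
--     n = len(ix)
--     starts = [k for k in range(n) if k == 0 or ix[k] != ix[k - 1] + 1]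
--     ends = starts[1:] + [n]
--     return [" ".join(texts[a:b]) for a, b in zip(starts, ends)]
-- ===== Notes on version B (the rewrite author's own statement) =====
-- stated objective: idiomatic
-- what changed: Replaces the nested while-loop cursor scan with a boundary-list decomposition: one comprehension collects the start index of every consecutive run, the ends are the shifted starts, and the result is a single zip/join comprehension over the (start, end) pairs.
import Mathlib
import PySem

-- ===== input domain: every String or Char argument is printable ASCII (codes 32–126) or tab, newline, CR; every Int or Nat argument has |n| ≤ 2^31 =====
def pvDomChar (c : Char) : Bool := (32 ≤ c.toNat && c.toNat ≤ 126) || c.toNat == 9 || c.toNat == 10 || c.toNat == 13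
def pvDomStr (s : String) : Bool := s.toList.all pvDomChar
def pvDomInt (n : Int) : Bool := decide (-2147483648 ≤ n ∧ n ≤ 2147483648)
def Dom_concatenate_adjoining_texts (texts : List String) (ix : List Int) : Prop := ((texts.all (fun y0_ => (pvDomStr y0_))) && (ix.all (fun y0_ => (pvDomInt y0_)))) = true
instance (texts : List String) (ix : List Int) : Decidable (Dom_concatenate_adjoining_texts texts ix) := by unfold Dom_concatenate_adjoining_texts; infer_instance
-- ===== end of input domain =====

-- B replaces A's nested while loops with a boundary-list decomposition (run starts, shifted ends, one zip/join pass); return values proved equal.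

-- ===== PORT A =====
-- inner while loop of A: advances j while j < len(ix) and ix[j] == ix[j-1] + 1
def pvInnerA (ix : List Int) (j : Nat) : Nat :=
  if h : j < ix.length ∧
      PySem.List.pyGet? ix (j : Int) = (PySem.List.pyGet? ix ((j : Int) - 1)).map (· + 1) then
    pvInnerA ix (j + 1)
  else j
termination_by ix.length - j
decreasing_by omega

-- needed by pvOuterA's termination proof
theorem pvInnerA_ge (ix : List Int) (j : Nat) : j ≤ pvInnerA ix j := by
  by_cases hc : j < ix.length ∧
      PySem.List.pyGet? ix (j : Int) = (PySem.List.pyGet? ix ((j : Int) - 1)).map (· + 1)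
  · rw [pvInnerA, dif_pos hc]
    exact Nat.le_trans (Nat.le_succ j) (pvInnerA_ge ix (j + 1))
  · rw [pvInnerA, dif_neg hc]
termination_by ix.length - j
decreasing_by omega

-- outer while loop of A
def pvOuterA (texts : List String) (ix : List Int) (i : Nat) : List String :=
  if h : i < ix.length then
    let j := pvInnerA ix (i + 1)
    PySem.Str.join " " (PySem.List.slice texts (some (i : Int)) (some (j : Int))) ::
      pvOuterA texts ix j
  else []
termination_by ix.length - i
decreasing_by
  have := pvInnerA_ge ix (i + 1)
  omega

def concatenate_adjoining_texts (texts : List String) (ix : List Int) : List String :=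
  pvOuterA texts ix 0

-- ===== PORT B =====
def concatenate_adjoining_texts_alt (texts : List String) (ix : List Int) : List String :=
  let n : Int := (ix.length : Int)
  let starts : List Int := (PySem.List.pyRange 0 n 1).filter (fun k =>
    k == 0 || !((PySem.List.pyGet? ix k) == (PySem.List.pyGet? ix (k - 1)).map (· + 1)))
  let ends : List Int := starts.drop 1 ++ [n]
  (starts.zip ends).map (fun ab => PySem.Str.join " " (PySem.List.slice texts (some ab.1) (some ab.2)))

-- ===== PRECONDITION & SPEC =====
def Spec_concatenate_adjoining_texts (texts : List String) (ix : List Int) (out : List String) : Prop := out = concatenate_adjoining_texts_alt texts ix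
instance (texts : List String) (ix : List Int) (out : List String) : Decidable (Spec_concatenate_adjoining_texts texts ix out) := by unfold Spec_concatenate_adjoining_texts; infer_instance

-- ===== CLAIM (what is proved, stated in full; the proofs are below) =====
def Claim_equal_concatenate_adjoining_texts : Prop := ∀ (texts : List String) (ix : List Int), Dom_concatenate_adjoining_texts texts ix → Spec_concatenate_adjoining_texts texts ix (concatenate_adjoining_texts texts ix)

-- ===== LEMMAS AND PROOFS =====
-- the boundary predicate of B's comprehension
def pvP (ix : List Int) (k : Int) : Bool :=
  k == 0 || !((PySem.List.pyGet? ix k) == (PySem.List.pyGet? ix (k - 1)).map (· + 1))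

theorem pvP_false (ix : List Int) (j : Nat) (hj : 1 ≤ j)
    (heq : PySem.List.pyGet? ix (j : Int) = (PySem.List.pyGet? ix ((j : Int) - 1)).map (· + 1)) :
    pvP ix (j : Int) = false := by
  simp [pvP, heq]; omega

theorem pvP_true (ix : List Int) (j : Nat)
    (hne : ¬ PySem.List.pyGet? ix (j : Int) = (PySem.List.pyGet? ix ((j : Int) - 1)).map (· + 1)) :
    pvP ix (j : Int) = true := by
  simp [pvP]
  exact Or.inr (by simpa using hne)

theorem pvInnerA_le (ix : List Int) (j : Nat) (h : j ≤ ix.length) :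
    pvInnerA ix j ≤ ix.length := by
  by_cases hc : j < ix.length ∧
      PySem.List.pyGet? ix (j : Int) = (PySem.List.pyGet? ix ((j : Int) - 1)).map (· + 1)
  · rw [pvInnerA, dif_pos hc]
    exact pvInnerA_le ix (j + 1) hc.1
  · rw [pvInnerA, dif_neg hc]; exact h
termination_by ix.length - j
decreasing_by omega

theorem pvInnerA_stop (ix : List Int) (j : Nat) (hj : 1 ≤ j)
    (h : pvInnerA ix j < ix.length) : pvP ix ((pvInnerA ix j : Nat) : Int) = true := by
  by_cases hc : j < ix.length ∧
      PySem.List.pyGet? ix (j : Int) = (PySem.List.pyGet? ix ((j : Int) - 1)).map (· + 1)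
  · rw [pvInnerA, dif_pos hc] at h ⊢
    exact pvInnerA_stop ix (j + 1) (by omega) h
  · rw [pvInnerA, dif_neg hc] at h ⊢
    exact pvP_true ix j (fun he => hc ⟨h, he⟩)
termination_by ix.length - j
decreasing_by omega

theorem pvFilter_skip (ix : List Int) (j : Nat) (hj : 1 ≤ j) :
    (PySem.List.pyRange (j : Int) (ix.length : Int) 1).filter (pvP ix) =
    (PySem.List.pyRange ((pvInnerA ix j : Nat) : Int) (ix.length : Int) 1).filter (pvP ix) := by
  by_cases hc : j < ix.length ∧
      PySem.List.pyGet? ix (j : Int) = (PySem.List.pyGet? ix ((j : Int) - 1)).map (· + 1)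
  · rw [pvInnerA, dif_pos hc]
    rw [PySem.List.pyRange_one_cons (by exact_mod_cast hc.1)]
    rw [List.filter_cons, pvP_false ix j hj hc.2]
    simp only [Bool.false_eq_true, if_false]
    have := pvFilter_skip ix (j + 1) (by omega)
    push_cast at this ⊢
    exact this
  · rw [pvInnerA, dif_neg hc]
termination_by ix.length - j
decreasing_by omega

def pvBodyB (texts : List String) (ix : List Int) (S : List Int) : List String :=
  (S.zip (S.drop 1 ++ [(ix.length : Int)])).map
    (fun ab => PySem.Str.join " " (PySem.List.slice texts (some ab.1) (some ab.2)))

theorem pvMain (texts : List String) (ix : List Int) (i : Nat)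
    (hle : i ≤ ix.length) (hP : i < ix.length → pvP ix (i : Int) = true) :
    pvOuterA texts ix i =
      pvBodyB texts ix ((PySem.List.pyRange (i : Int) (ix.length : Int) 1).filter (pvP ix)) := by
  by_cases hlt : i < ix.length
  · rw [pvOuterA, dif_pos hlt]
    rw [PySem.List.pyRange_one_cons (by exact_mod_cast hlt)]
    rw [List.filter_cons, hP hlt]
    simp only [if_true]
    have hj1 : i + 1 ≤ pvInnerA ix (i + 1) := pvInnerA_ge ix (i + 1)
    have hjle : pvInnerA ix (i + 1) ≤ ix.length := pvInnerA_le ix (i + 1) (by omega)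
    set j := pvInnerA ix (i + 1) with hjdef
    have hskip : (PySem.List.pyRange ((i : Int) + 1) (ix.length : Int) 1).filter (pvP ix) =
        (PySem.List.pyRange ((j : Nat) : Int) (ix.length : Int) 1).filter (pvP ix) := by
      have := pvFilter_skip ix (i + 1) (by omega)
      push_cast at this ⊢
      rw [hjdef]
      exact this
    rw [hskip]
    set S := (PySem.List.pyRange ((j : Nat) : Int) (ix.length : Int) 1).filter (pvP ix) with hSdef
    have hrec := pvMain texts ix j hjle (fun hlt' => by
      rw [hjdef] at hlt' ⊢
      exact pvInnerA_stop ix (i + 1) (by omega) hlt')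
    have hzip : (((i : Int) :: S).zip (S ++ [(ix.length : Int)])) =
        ((i : Int), ((j : Nat) : Int)) :: (S.zip (S.drop 1 ++ [(ix.length : Int)])) := by
      by_cases hjn : j < ix.length
      · have hScons : S = ((j : Nat) : Int) ::
            (PySem.List.pyRange (((j : Nat) : Int) + 1) (ix.length : Int) 1).filter (pvP ix) := by
          rw [hSdef, PySem.List.pyRange_one_cons (by exact_mod_cast hjn), List.filter_cons]
          rw [hjdef, pvInnerA_stop ix (i + 1) (by omega) (by rw [hjdef] at hjn; exact hjn)]
          simp
        rw [hScons]; simp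
      · have hjeq : j = ix.length := by omega
        have hSnil : S = [] := by
          rw [hSdef, hjeq, PySem.List.pyRange_one_eq_nil (le_refl _)]
          rfl
        rw [hSnil, hjeq]
        simp
    rw [← hSdef] at hrec
    rw [hrec]
    simp only [pvBodyB, List.drop_one, List.tail_cons]
    rw [hzip]
    simp only [List.map_cons, List.drop_one]
  · rw [pvOuterA, dif_neg hlt]
    have : i = ix.length := by omega
    subst this
    rw [PySem.List.pyRange_one_eq_nil (le_refl _)]
    rfl
termination_by ix.length - i
decreasing_by omega

-- ===== VERDICT (by name: the statement is the Claim_ definition above) =====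
theorem concatenate_adjoining_texts_spec : Claim_equal_concatenate_adjoining_texts := by
  intro texts ix _
  unfold Spec_concatenate_adjoining_texts concatenate_adjoining_texts concatenate_adjoining_texts_alt
  have h := pvMain texts ix 0 (Nat.zero_le _) (fun _ => by simp [pvP])
  rw [show ((0 : Nat) : Int) = 0 from rfl] at h
  rw [h]
  rfl
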